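-- pv_equiv track=rewrite | github.com/francool57/FProg-Resolucoes | LAB06-07/ex10.py | descodifica
-- ===== SOURCE A (Python) =====
-- def descodifica(cod):
--     left = cod[0:len(cod)//2]
--     right = cod[len(cod)//2:]
--     res = ''
--
--     if len(left) == len(right):
--         for n,m in zip(left,right):
--             res += n + m
--     else:
--         for n,m in zip(left, right[1:]):
--             res += n + m
--         res += right[0]
--
--     return res
-- ===== SOURCE B (Python) =====
-- def descodifica(cod):
--     n = len(cod)
--     half = n // 2
--     def pick(j):
--         if n % 2 == 1 and j == n - 1:
--             return cod[half]
--         q, r = divmod(j, 2)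
--         if r == 0:
--             return cod[q]
--         return cod[half + q] if n % 2 == 0 else cod[half + 1 + q]
--     return ''.join(map(pick, range(n)))
-- ===== Notes on version B (the rewrite author's own statement) =====
-- stated objective: alternative
-- what changed: Replaced A's split-into-halves + zip-and-append interleave (with a separate odd-length branch) by a single index-driven pass: each output position j is computed directly from j by parity arithmetic and the result is built with one join over range(n).
import Mathlib
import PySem

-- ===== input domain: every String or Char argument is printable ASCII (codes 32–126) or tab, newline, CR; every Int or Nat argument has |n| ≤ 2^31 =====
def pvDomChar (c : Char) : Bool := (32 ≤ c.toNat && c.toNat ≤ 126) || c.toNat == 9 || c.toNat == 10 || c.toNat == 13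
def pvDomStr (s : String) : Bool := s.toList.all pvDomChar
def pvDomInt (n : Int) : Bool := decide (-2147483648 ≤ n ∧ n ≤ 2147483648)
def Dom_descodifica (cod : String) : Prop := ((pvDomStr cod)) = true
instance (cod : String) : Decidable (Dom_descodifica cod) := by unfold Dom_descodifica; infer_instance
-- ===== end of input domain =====

-- B rebuilds the string in one index-driven pass (output position j computed by parity
-- arithmetic) instead of A's zip-the-two-halves sequential interleave; objective: alternative.

-- ===== PORT A =====
-- cod[0:len(cod)//2] and cod[len(cod)//2:] have nonnegative bounds, so they are exactly
-- take/drop on the character list; res += n + m is the foldl; right[0] is safe in the else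
-- branch (right is the longer half there), ported as getD 0.
def descodifica (cod : String) : String :=
  let l := cod.toList
  let left := l.take (l.length / 2)
  let right := l.drop (l.length / 2)
  if left.length = right.length then
    String.mk ((left.zip right).foldl (fun r p => r ++ [p.1, p.2]) [])
  else
    String.mk ((left.zip (right.drop 1)).foldl (fun r p => r ++ [p.1, p.2]) [] ++ [right.getD 0 ' '])

-- ===== PORT B =====
-- one pass over the output indices; each character is picked directly by arithmetic on j
def descodifica_alt (cod : String) : String :=
  let l := cod.toList
  let n := l.length
  let half := n / 2
  String.mk ((List.range n).map (fun j =>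
    if n % 2 = 1 ∧ j = n - 1 then l.getD half ' '
    else if j % 2 = 0 then l.getD (j / 2) ' '
    else if n % 2 = 0 then l.getD (half + j / 2) ' '
    else l.getD (half + 1 + j / 2) ' '))

-- ===== PRECONDITION & SPEC =====
def Spec_descodifica (cod : String) (out : String) : Prop := out = descodifica_alt cod
instance (cod : String) (out : String) : Decidable (Spec_descodifica cod out) := by unfold Spec_descodifica; infer_instance

-- ===== CLAIM (what is proved, stated in full; the proofs are below) =====
def Claim_equal_descodifica : Prop := ∀ (cod : String), Dom_descodifica cod → Spec_descodifica cod (descodifica cod)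

-- ===== LEMMAS AND PROOFS =====

-- perfect interleave of two lists, stopping at the shorter (like zip)
def itl : List Char → List Char → List Char
  | a :: as, b :: bs => a :: b :: itl as bs
  | _, _ => []

theorem zip_flat (as : List Char) (bs : List Char) :
    (as.zip bs).flatMap (fun p => [p.1, p.2]) = itl as bs := by
  induction as generalizing bs with
  | nil => cases bs <;> simp [itl]
  | cons a as ih => cases bs with
    | nil => simp [itl]
    | cons b bs => simp [itl, ih]

theorem itl_append (as bs : List Char) (a b : Char) (h : as.length = bs.length) :
    itl (as ++ [a]) (bs ++ [b]) = itl as bs ++ [a, b] := by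
  induction as generalizing bs with
  | nil =>
    cases bs with
    | nil => simp [itl]
    | cons x xs => simp at h
  | cons x xs ih =>
    cases bs with
    | nil => simp at h
    | cons y ys =>
      simp only [List.cons_append, itl, List.length_cons] at *
      rw [ih ys (by omega)]

theorem range_map_itl (h : Nat) (g : Nat → Char) :
    (List.range (2 * h)).map g
      = itl ((List.range h).map (fun i => g (2 * i))) ((List.range h).map (fun i => g (2 * i + 1))) := by
  induction h with
  | zero => simp [itl]
  | succ k ih =>
    have e : 2 * (k + 1) = (2 * k + 1) + 1 := by omega
    rw [e, List.range_succ, List.range_succ, List.range_succ]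
    simp only [List.map_append, List.map_cons, List.map_nil, List.append_assoc,
      List.cons_append, List.nil_append]
    rw [itl_append _ _ (g (2 * k)) (g (2 * k + 1)) (by simp), ← ih]

theorem map_getD_drop (l : List Char) (c : Nat) (_hc : c ≤ l.length) :
    (List.range (l.length - c)).map (fun i => l.getD (c + i) ' ') = l.drop c := by
  apply List.ext_getElem
  · simp
  · intro i h1 h2
    simp only [List.getElem_map, List.getElem_range, List.getElem_drop]
    rw [List.getD_eq_getElem]

theorem map_getD_take (l : List Char) (h : Nat) (hh : h ≤ l.length) :
    (List.range h).map (fun i => l.getD i ' ') = l.take h := by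
  apply List.ext_getElem
  · simp [hh]
  · intro i h1 h2
    simp only [List.getElem_map, List.getElem_range, List.getElem_take]
    rw [List.getD_eq_getElem]

-- both sides of both branches reduce to itl via foldl_append_eq_flatMap + zip_flat
theorem foldl_acc (ps : List (Char × Char)) (acc : List Char) :
    ps.foldl (fun r p => r ++ [p.1, p.2]) acc = acc ++ ps.flatMap (fun p => [p.1, p.2]) := by
  induction ps generalizing acc with
  | nil => simp
  | cons p ps ih => simp [ih]

theorem foldl_itl (as bs : List Char) :
    (as.zip bs).foldl (fun r p => r ++ [p.1, p.2]) [] = itl as bs := by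
  rw [foldl_acc]
  simp [zip_flat]

-- ===== VERDICT (by name: the statement is the Claim_ definition above) =====
theorem descodifica_spec : Claim_equal_descodifica := by
  intro cod _
  unfold Spec_descodifica descodifica descodifica_alt
  set l := cod.toList with hl
  set n := l.length with hn
  set half := n / 2 with hhalf
  simp only []
  have hhle : half ≤ n := Nat.div_le_self _ _
  have hlen_left : (l.take (l.length / 2)).length = half := by
    simp [← hn, ← hhalf, hhle]
  have hlen_right : (l.drop (l.length / 2)).length = n - half := by
    simp [← hn, ← hhalf]
  rcases Nat.even_or_odd n with he | ho
  · -- even: n = 2 * half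
    have h2 : n = 2 * half := by
      rcases he with ⟨k, hk⟩; omega
    have hmod : n % 2 = 0 := by omega
    rw [if_pos (by rw [hlen_left, hlen_right]; omega)]
    congr 1
    rw [foldl_itl]
    have hg : (fun j => if n % 2 = 1 ∧ j = n - 1 then l.getD half ' '
        else if j % 2 = 0 then l.getD (j / 2) ' '
        else if n % 2 = 0 then l.getD (half + j / 2) ' '
        else l.getD (half + 1 + j / 2) ' ')
        = (fun j => if j % 2 = 0 then l.getD (j / 2) ' ' else l.getD (half + j / 2) ' ') := by
      funext j
      rw [if_neg (by omega), if_pos hmod]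
    rw [hg]
    rw [show List.range n = List.range (2 * half) by rw [← h2]]
    rw [range_map_itl half]
    have e1 : (fun i => if (2 * i) % 2 = 0 then l.getD (2 * i / 2) ' ' else l.getD (half + 2 * i / 2) ' ')
        = (fun i : Nat => l.getD i ' ') := by
      funext i; rw [if_pos (by omega)]; congr 1; omega
    have e2 : (fun i => if (2 * i + 1) % 2 = 0 then l.getD ((2 * i + 1) / 2) ' ' else l.getD (half + (2 * i + 1) / 2) ' ')
        = (fun i : Nat => l.getD (half + i) ' ') := by
      funext i; rw [if_neg (by omega)]; congr 1; omega
    simp only [e1, e2]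
    rw [map_getD_take l half (by omega)]
    rw [show List.range half = List.range (l.length - half) by rw [← hn]; congr 1; omega]
    rw [map_getD_drop l half (by omega)]
  · -- odd: n = 2 * half + 1
    have h2 : n = 2 * half + 1 := by
      rcases ho with ⟨k, hk⟩; omega
    have hmod : n % 2 = 1 := by omega
    rw [if_neg (by rw [hlen_left, hlen_right]; omega)]
    congr 1
    rw [foldl_itl]
    have hdd : (l.drop (l.length / 2)).drop 1 = l.drop (half + 1) := by
      rw [List.drop_drop, ← hn, ← hhalf, Nat.add_comm]
    have hd0 : (l.drop (l.length / 2)).getD 0 ' ' = l.getD half ' ' := by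
      rw [List.getD_eq_getElem _ _ (by rw [hlen_right]; omega),
          List.getD_eq_getElem _ _ (by omega), List.getElem_drop]
      congr 1
    rw [hdd, hd0]
    -- B side: peel the last index, then simplify the rest
    rw [show List.range n = List.range (2 * half) ++ [2 * half] by
      rw [show (2 * half : Nat) = n - 1 by omega, ← List.range_succ]; congr 1; omega]
    rw [List.map_append]
    rw [show ([2 * half] : List Nat).map (fun j => if n % 2 = 1 ∧ j = n - 1 then l.getD half ' '
        else if j % 2 = 0 then l.getD (j / 2) ' '
        else if n % 2 = 0 then l.getD (half + j / 2) ' '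
        else l.getD (half + 1 + j / 2) ' ') = [l.getD half ' '] from by
      simp only [List.map_cons, List.map_nil]
      rw [if_pos ⟨hmod, by omega⟩]]
    congr 1
    rw [List.map_congr_left (g := fun j => if j % 2 = 0 then l.getD (j / 2) ' '
        else l.getD (half + 1 + j / 2) ' ')
      (by intro j hj
          simp only [List.mem_range] at hj
          rw [if_neg (by omega)]
          by_cases hp : j % 2 = 0
          · rw [if_pos hp]
            show _ = if j % 2 = 0 then l.getD (j / 2) ' ' else l.getD (half + 1 + j / 2) ' '
            rw [if_pos hp]
          · rw [if_neg hp, if_neg (show ¬ (l.length % 2 = 0) by omega)]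
            show _ = if j % 2 = 0 then l.getD (j / 2) ' ' else l.getD (half + 1 + j / 2) ' '
            rw [if_neg hp])]
    rw [range_map_itl half]
    have e1 : (fun i => if (2 * i) % 2 = 0 then l.getD (2 * i / 2) ' ' else l.getD (half + 1 + 2 * i / 2) ' ')
        = (fun i : Nat => l.getD i ' ') := by
      funext i; rw [if_pos (by omega)]; congr 1; omega
    have e2 : (fun i => if (2 * i + 1) % 2 = 0 then l.getD ((2 * i + 1) / 2) ' ' else l.getD (half + 1 + (2 * i + 1) / 2) ' ')
        = (fun i : Nat => l.getD (half + 1 + i) ' ') := by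
      funext i; rw [if_neg (by omega)]; congr 1; omega
    simp only [e1, e2]
    rw [map_getD_take l half (by omega)]
    rw [show List.range half = List.range (l.length - (half + 1)) by rw [← hn]; congr 1; omega]
    rw [map_getD_drop l (half + 1) (by omega)]
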